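-- pv_equiv track=rewrite | github.com/xtxdfl/CloudRealm | cloud-common/cloud_commons/repo_manager/apt_parser.py | parse_dpkg_status
-- ===== SOURCE A (Python) =====
-- from typing import Dict, Generator, List, Optional, Tuple, Union
--
-- def parse_dpkg_status(
--     stream: Generator[str, None, None]
-- ) -> Dict[str, Dict[str, str]]:
--     """
--     解析/var/lib/dpkg/status文件
--     格式:
--       Package: package_name
--       Status: install ok installed
--       Priority: optional
--       Section: admin
--       Version: 1.2.3-0
--       ...
--     """
--     status_db = {}
--     current_pkg = {}
--     current_key = None
--
--     for line in stream:
--         line = line.strip()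
--
--         # 新包开始，存储前一个
--         if not line and current_pkg:
--             pkg_name = current_pkg.get('Package')
--             if pkg_name:
--                 status_db[pkg_name] = current_pkg
--             current_pkg = {}
--             current_key = None
--             continue
--
--         # 键值行
--         if line and ':' in line:
--             key, value = line.split(':', 1)
--             key = key.strip()
--             value = value.strip()
--
--             # 多行键处理
--             if key == "Description" and value == "":
--                 continue
--
--             current_key = key
--             if key not in current_pkg:
--                 current_pkg[key] = value
--             else:
--                 # 处理多行值
--                 current_pkg[key] += '\n' + value
--             continue
--
--         # 多行续行
--         if current_key and line.startswith(' '):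
--             if current_key in current_pkg:
--                 current_pkg[current_key] += '\n' + line.strip()
--
--     # 添加最后一个包（如果存在）
--     if current_pkg:
--         pkg_name = current_pkg.get('Package')
--         if pkg_name:
--             status_db[pkg_name] = current_pkg
--
--     return status_db
-- ===== SOURCE B (Python) =====
-- def parse_dpkg_status(stream):
--     # Phase 1: gather stripped non-blank lines into blank-separated blocks.
--     blocks = []
--     cur = []
--     for line in stream:
--         s = line.strip()
--         if s:
--             cur.append(s)
--         elif cur:
--             blocks.append(cur)
--             cur = []
--     if cur:
--         blocks.append(cur)
--     # Phase 2: parse each block into a field dict, then index by package name.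
--     status_db = {}
--     for blk in blocks:
--         pkg = {}
--         for s in blk:
--             if ':' not in s:
--                 continue
--             key, value = s.split(':', 1)
--             key = key.strip()
--             value = value.strip()
--             if key == 'Description' and value == '':
--                 continue
--             if key in pkg:
--                 pkg[key] += '\n' + value
--             else:
--                 pkg[key] = value
--         name = pkg.get('Package')
--         if name:
--             status_db[name] = pkg
--     return status_db
-- ===== Notes on version B (the rewrite author's own statement) =====
-- stated objective: alternative
-- what changed: A's single fused state machine carrying (status_db, current_pkg, current_key) across the stream is replaced by a two-phase decomposition: first split the stream into blank-line-separated blocks of stripped lines, then parse each block independently into a field dict and index the parsed dicts by their 'Package' key.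
import Mathlib
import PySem

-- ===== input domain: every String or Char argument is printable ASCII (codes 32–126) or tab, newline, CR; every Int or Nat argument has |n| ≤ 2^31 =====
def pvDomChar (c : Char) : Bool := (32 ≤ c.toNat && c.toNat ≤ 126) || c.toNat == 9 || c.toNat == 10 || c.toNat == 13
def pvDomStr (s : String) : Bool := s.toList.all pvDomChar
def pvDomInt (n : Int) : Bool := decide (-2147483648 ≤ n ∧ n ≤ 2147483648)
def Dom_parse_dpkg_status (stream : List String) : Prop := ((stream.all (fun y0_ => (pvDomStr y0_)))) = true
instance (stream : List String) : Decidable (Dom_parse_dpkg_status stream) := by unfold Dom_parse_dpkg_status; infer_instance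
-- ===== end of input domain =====

-- B replaces A's single fused state machine (db, current_pkg, current_key) by a two-phase
-- decomposition — split the stream into blank-separated blocks, then parse each block into a
-- dict and index by 'Package' — objective: alternative (same cost, clearer structure).


-- ===== PORT A =====
-- A-side helper: 'pkg_name = current_pkg.get("Package"); if pkg_name: status_db[pkg_name] = current_pkg'
def pvStoreA (db : PySem.Dict String (PySem.Dict String String))
    (cur : PySem.Dict String String) : PySem.Dict String (PySem.Dict String String) :=
  match cur.get? "Package" with
  | some p => if p ≠ "" then db.insert p cur else db
  | none => db

-- the 'for line in stream' loop, carrying (status_db, current_pkg, current_key)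
def pvLoopA (stream : List String) (db : PySem.Dict String (PySem.Dict String String))
    (cur : PySem.Dict String String) (curKey : Option String) :
    PySem.Dict String (PySem.Dict String String) × PySem.Dict String String × Option String :=
  match stream with
  | [] => (db, cur, curKey)
  | l :: rest =>
    let line := PySem.Str.strip l
    if line = "" ∧ cur.size ≠ 0 then
      pvLoopA rest (pvStoreA db cur) PySem.Dict.empty none
    else if line ≠ "" ∧ PySem.Str.isIn ":" line then
      let parts := (PySem.Str.splitMax? line ":" 1).getD []
      let key := PySem.Str.strip (parts.getD 0 "")
      let value := PySem.Str.strip (parts.getD 1 "")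
      if key = "Description" ∧ value = "" then pvLoopA rest db cur curKey
      else
        let cur' := if ¬ cur.contains key then cur.insert key value
                    else cur.insert key (cur.getD key "" ++ "\n" ++ value)
        pvLoopA rest db cur' (some key)
    else if curKey.isSome ∧ PySem.Str.startswith line " " then
      match curKey with
      | some ck =>
        if cur.contains ck then
          pvLoopA rest db (cur.insert ck (cur.getD ck "" ++ "\n" ++ PySem.Str.strip line)) curKey
        else pvLoopA rest db cur curKey
      | none => pvLoopA rest db cur curKey
    else pvLoopA rest db cur curKey

def parse_dpkg_status (stream : List String) : List (String × List (String × String)) :=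
  let r := pvLoopA stream PySem.Dict.empty PySem.Dict.empty none
  let db := if r.2.1.size ≠ 0 then pvStoreA r.1 r.2.1 else r.1
  db.items.map (fun kv => (kv.1, kv.2.items))

-- ===== PORT B =====
-- phase 1: accumulate stripped non-blank lines, emit a block on each blank line
def pvBlocksStep (st : List (List String) × List String) (line : String) :
    List (List String) × List String :=
  let s := PySem.Str.strip line
  if s ≠ "" then (st.1, st.2 ++ [s])
  else if st.2 ≠ [] then (st.1 ++ [st.2], [])
  else st

def pvBlocks (stream : List String) : List (List String) :=
  let p := stream.foldl pvBlocksStep ([], [])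
  if p.2 ≠ [] then p.1 ++ [p.2] else p.1

-- phase 2: parse one line of a block into the field dict
def pvParseLine (pkg : PySem.Dict String String) (s : String) : PySem.Dict String String :=
  if ¬ PySem.Str.isIn ":" s then pkg
  else
    let parts := (PySem.Str.splitMax? s ":" 1).getD []
    let key := PySem.Str.strip (parts.getD 0 "")
    let value := PySem.Str.strip (parts.getD 1 "")
    if key = "Description" ∧ value = "" then pkg
    else if pkg.contains key then pkg.insert key (pkg.getD key "" ++ "\n" ++ value)
    else pkg.insert key value

def pvParseBlock (blk : List String) : PySem.Dict String String :=
  blk.foldl pvParseLine PySem.Dict.empty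

-- 'name = pkg.get("Package"); if name: status_db[name] = pkg'
def pvEmitB (db : PySem.Dict String (PySem.Dict String String)) (blk : List String) :
    PySem.Dict String (PySem.Dict String String) :=
  let pkg := pvParseBlock blk
  match pkg.get? "Package" with
  | some name => if name ≠ "" then db.insert name pkg else db
  | none => db

def parse_dpkg_status_alt (stream : List String) : List (String × List (String × String)) :=
  ((pvBlocks stream).foldl pvEmitB PySem.Dict.empty).items.map (fun kv => (kv.1, kv.2.items))

-- ===== PRECONDITION & SPEC =====
def Spec_parse_dpkg_status (stream : List String) (out : List (String × List (String × String))) : Prop := out = parse_dpkg_status_alt stream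
instance (stream : List String) (out : List (String × List (String × String))) : Decidable (Spec_parse_dpkg_status stream out) := by unfold Spec_parse_dpkg_status; infer_instance

-- ===== CLAIM (what is proved, stated in full; the proofs are below) =====
def Claim_equal_parse_dpkg_status : Prop := ∀ (stream : List String), Dom_parse_dpkg_status stream → Spec_parse_dpkg_status stream (parse_dpkg_status stream)

-- ===== LEMMAS AND PROOFS =====

-- the dict A's final flush produces, as a function of the loop result
def pvFinishA (r : PySem.Dict String (PySem.Dict String String) × PySem.Dict String String × Option String) :
    PySem.Dict String (PySem.Dict String String) :=
  if r.2.1.size ≠ 0 then pvStoreA r.1 r.2.1 else r.1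

-- B's remaining work, as a function of the pending-block state
def pvRestB (db : PySem.Dict String (PySem.Dict String String)) (curB : List String)
    (stream : List String) : PySem.Dict String (PySem.Dict String String) :=
  let p := stream.foldl pvBlocksStep ([], curB)
  (if p.2 ≠ [] then p.1 ++ [p.2] else p.1).foldl pvEmitB db

-- a stripped nonempty line never starts with a space
lemma strip_cons_not_space (cs : List Char) (c : Char) (t : List Char)
    (h : PySem.Chars.strip cs = c :: t) : PySem.Chars.isspace c = false := by
  have hpre : c :: t <+: cs.dropWhile PySem.Chars.isspace := by
    rw [← h]
    simpa [PySem.Chars.strip, PySem.Chars.rstrip, PySem.Chars.lstrip] using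
      List.reverse_prefix.mpr
        (List.dropWhile_suffix (l := (cs.dropWhile PySem.Chars.isspace).reverse) PySem.Chars.isspace)
  obtain ⟨r, hr⟩ := hpre
  have := List.head_dropWhile_not PySem.Chars.isspace
    (l := cs) (w := by simp [← hr])
  simpa [← hr] using this

lemma chars_startswith_strip_space (cs : List Char) :
    PySem.Chars.startswith (PySem.Chars.strip cs) [' '] = false := by
  cases h : PySem.Chars.strip cs with
  | nil => rfl
  | cons c t =>
    have hc := strip_cons_not_space cs c t h
    have hbe : (' ' == c) = false := by
      cases hbe : (' ' == c)
      · rfl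
      · exfalso
        have he : ' ' = c := eq_of_beq hbe
        rw [← he] at hc
        simp [PySem.Chars.isspace] at hc
    simp [PySem.Chars.startswith, List.isPrefixOf, hbe]

lemma startswith_strip_space (l : String) :
    PySem.Str.startswith (PySem.Str.strip l) " " = false := by
  rw [PySem.Str.startswith_eq, PySem.Str.toList_strip,
    show (" " : String).toList = [' '] by decide]
  exact chars_startswith_strip_space l.toList

lemma size_zero_get? (d : PySem.Dict String String) (k : String)
    (h : d.size = 0) : d.get? k = none := by
  cases d with
  | mk items =>
    cases items with
    | nil => rfl
    | cons a l => simp [PySem.Dict.size] at h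

lemma size_zero_eq_empty (d : PySem.Dict String String) (h : d.size = 0) :
    d = PySem.Dict.empty := by
  cases d with
  | mk items =>
    cases items with
    | nil => rfl
    | cons a l => simp [PySem.Dict.size] at h

-- step lemmas for A's loop (one per live branch of the state machine)
lemma loopA_cons_flush (l : String) (rest : List String)
    (db : PySem.Dict String (PySem.Dict String String)) (cur : PySem.Dict String String)
    (k : Option String) (h1 : PySem.Str.strip l = "") (h2 : cur.size ≠ 0) :
    pvLoopA (l :: rest) db cur k = pvLoopA rest (pvStoreA db cur) PySem.Dict.empty none := by
  conv_lhs => rw [pvLoopA.eq_def]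
  simp only []
  rw [if_pos ⟨h1, h2⟩]

lemma loopA_cons_blank_skip (l : String) (rest : List String)
    (db : PySem.Dict String (PySem.Dict String String)) (cur : PySem.Dict String String)
    (k : Option String) (h1 : PySem.Str.strip l = "") (h2 : cur.size = 0) :
    pvLoopA (l :: rest) db cur k = pvLoopA rest db cur k := by
  conv_lhs => rw [pvLoopA.eq_def]
  simp only []
  rw [if_neg (fun hx => hx.2 h2), if_neg (fun hx => hx.1 h1),
    if_neg (fun hx => by rw [startswith_strip_space l] at hx; exact Bool.false_ne_true hx.2)]

lemma loopA_cons_nocolon_skip (l : String) (rest : List String)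
    (db : PySem.Dict String (PySem.Dict String String)) (cur : PySem.Dict String String)
    (k : Option String) (h1 : PySem.Str.strip l ≠ "")
    (h2 : PySem.Str.isIn ":" (PySem.Str.strip l) = false) :
    pvLoopA (l :: rest) db cur k = pvLoopA rest db cur k := by
  conv_lhs => rw [pvLoopA.eq_def]
  simp only []
  rw [if_neg (fun hx => h1 hx.1), if_neg (fun hx => by rw [h2] at hx; exact Bool.false_ne_true hx.2),
    if_neg (fun hx => by rw [startswith_strip_space l] at hx; exact Bool.false_ne_true hx.2)]

lemma loopA_cons_kv (l : String) (rest : List String)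
    (db : PySem.Dict String (PySem.Dict String String)) (cur : PySem.Dict String String)
    (k : Option String) (h1 : PySem.Str.strip l ≠ "")
    (h2 : PySem.Str.isIn ":" (PySem.Str.strip l) = true) :
    pvLoopA (l :: rest) db cur k =
      (if PySem.Str.strip (((PySem.Str.splitMax? (PySem.Str.strip l) ":" 1).getD []).getD 0 "") = "Description" ∧
          PySem.Str.strip (((PySem.Str.splitMax? (PySem.Str.strip l) ":" 1).getD []).getD 1 "") = "" then
        pvLoopA rest db cur k
      else
        pvLoopA rest db
          (if ¬ cur.contains (PySem.Str.strip (((PySem.Str.splitMax? (PySem.Str.strip l) ":" 1).getD []).getD 0 "")) then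
            cur.insert (PySem.Str.strip (((PySem.Str.splitMax? (PySem.Str.strip l) ":" 1).getD []).getD 0 ""))
              (PySem.Str.strip (((PySem.Str.splitMax? (PySem.Str.strip l) ":" 1).getD []).getD 1 ""))
          else
            cur.insert (PySem.Str.strip (((PySem.Str.splitMax? (PySem.Str.strip l) ":" 1).getD []).getD 0 ""))
              (cur.getD (PySem.Str.strip (((PySem.Str.splitMax? (PySem.Str.strip l) ":" 1).getD []).getD 0 "")) "" ++ "\n" ++
                PySem.Str.strip (((PySem.Str.splitMax? (PySem.Str.strip l) ":" 1).getD []).getD 1 "")))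
          (some (PySem.Str.strip (((PySem.Str.splitMax? (PySem.Str.strip l) ":" 1).getD []).getD 0 "")))) := by
  conv_lhs => rw [pvLoopA.eq_def]
  simp only []
  rw [if_neg (fun hx => h1 hx.1), if_pos ⟨h1, h2⟩]

-- the matching expansion of B's line parser
lemma parseLine_kv (pkg : PySem.Dict String String) (s : String)
    (h : PySem.Str.isIn ":" s = true) :
    pvParseLine pkg s =
      (if PySem.Str.strip (((PySem.Str.splitMax? s ":" 1).getD []).getD 0 "") = "Description" ∧
          PySem.Str.strip (((PySem.Str.splitMax? s ":" 1).getD []).getD 1 "") = "" then pkg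
      else if pkg.contains (PySem.Str.strip (((PySem.Str.splitMax? s ":" 1).getD []).getD 0 "")) then
        pkg.insert (PySem.Str.strip (((PySem.Str.splitMax? s ":" 1).getD []).getD 0 ""))
          (pkg.getD (PySem.Str.strip (((PySem.Str.splitMax? s ":" 1).getD []).getD 0 "")) "" ++ "\n" ++
            PySem.Str.strip (((PySem.Str.splitMax? s ":" 1).getD []).getD 1 ""))
      else
        pkg.insert (PySem.Str.strip (((PySem.Str.splitMax? s ":" 1).getD []).getD 0 ""))
          (PySem.Str.strip (((PySem.Str.splitMax? s ":" 1).getD []).getD 1 ""))) := by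
  conv_lhs => rw [pvParseLine.eq_def]
  simp only []
  rw [if_neg (fun hx => hx (by rw [h]))]

lemma parseLine_nocolon (pkg : PySem.Dict String String) (s : String)
    (h : PySem.Str.isIn ":" s = false) : pvParseLine pkg s = pkg := by
  conv_lhs => rw [pvParseLine.eq_def]
  simp only []
  rw [if_pos (by rw [h]; exact Bool.false_ne_true)]

-- the blocks accumulator only ever appends: the prefix commutes out
lemma blocksStep_prefix (stream : List String) : ∀ (blocks : List (List String)) (curB : List String),
    stream.foldl pvBlocksStep (blocks, curB)
      = (blocks ++ (stream.foldl pvBlocksStep ([], curB)).1, (stream.foldl pvBlocksStep ([], curB)).2) := by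
  induction stream with
  | nil => intro blocks curB; simp
  | cons l rest ih =>
    intro blocks curB
    simp only [List.foldl_cons]
    by_cases h1 : PySem.Str.strip l ≠ ""
    · rw [show pvBlocksStep (blocks, curB) l = (blocks, curB ++ [PySem.Str.strip l]) by
        simp [pvBlocksStep, h1],
        show pvBlocksStep (([] : List (List String)), curB) l = ([], curB ++ [PySem.Str.strip l]) by
        simp [pvBlocksStep, h1]]
      exact ih blocks _
    · by_cases h2 : curB ≠ []
      · rw [show pvBlocksStep (blocks, curB) l = (blocks ++ [curB], []) by
          simp [pvBlocksStep, h1, h2],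
          show pvBlocksStep (([] : List (List String)), curB) l = ([curB], []) by
          simp [pvBlocksStep, h1, h2]]
        rw [ih (blocks ++ [curB]) [], ih [curB] []]
        simp
      · rw [show pvBlocksStep (blocks, curB) l = (blocks, curB) by simp [pvBlocksStep, h1, h2],
          show pvBlocksStep (([] : List (List String)), curB) l = ([], curB) by
          simp [pvBlocksStep, h1, h2]]
        exact ih blocks curB

-- step characterisations of pvRestB
lemma pvRestB_cons_nonblank (db : PySem.Dict String (PySem.Dict String String)) (curB : List String)
    (l : String) (rest : List String) (h : PySem.Str.strip l ≠ "") :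
    pvRestB db curB (l :: rest) = pvRestB db (curB ++ [PySem.Str.strip l]) rest := by
  simp only [pvRestB, List.foldl_cons]
  rw [show pvBlocksStep (([] : List (List String)), curB) l = ([], curB ++ [PySem.Str.strip l]) by
    simp [pvBlocksStep, h]]

lemma pvRestB_cons_blank_emit (db : PySem.Dict String (PySem.Dict String String)) (curB : List String)
    (l : String) (rest : List String) (h : PySem.Str.strip l = "") (h2 : curB ≠ []) :
    pvRestB db curB (l :: rest) = pvRestB (pvEmitB db curB) [] rest := by
  simp only [pvRestB, List.foldl_cons]
  rw [show pvBlocksStep (([] : List (List String)), curB) l = ([curB], []) by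
    simp [pvBlocksStep, h, h2]]
  rw [blocksStep_prefix rest [curB] []]
  by_cases hc : (rest.foldl pvBlocksStep ([], ([] : List String))).2 ≠ [] <;> simp [hc]

lemma pvRestB_cons_blank_skip (db : PySem.Dict String (PySem.Dict String String))
    (l : String) (rest : List String) (h : PySem.Str.strip l = "") :
    pvRestB db [] (l :: rest) = pvRestB db [] rest := by
  simp only [pvRestB, List.foldl_cons]
  rw [show pvBlocksStep (([] : List (List String)), ([] : List String)) l = ([], []) by
    simp [pvBlocksStep, h]]

lemma parseBlock_append (blk : List String) (s : String) :
    pvParseBlock (blk ++ [s]) = pvParseLine (pvParseBlock blk) s := by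
  simp [pvParseBlock]

-- main invariant: A's fused loop equals B's pending-block computation
lemma loopA_eq_restB (stream : List String) : ∀ (db : PySem.Dict String (PySem.Dict String String))
    (curB : List String) (curKey : Option String),
    pvFinishA (pvLoopA stream db (pvParseBlock curB) curKey) = pvRestB db curB stream := by
  induction stream with
  | nil =>
    intro db curB curKey
    simp only [pvLoopA, pvFinishA, pvRestB, List.foldl_nil]
    by_cases h : curB ≠ []
    · rw [if_pos h]
      simp only [List.nil_append, List.foldl_cons, List.foldl_nil]
      by_cases hs : (pvParseBlock curB).size ≠ 0
      · simp [hs, pvStoreA, pvEmitB]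
      · rw [if_neg hs]
        push_neg at hs
        simp [pvEmitB, size_zero_get? _ _ hs, pvStoreA]
    · push_neg at h; subst h
      simp [show (pvParseBlock []).size = 0 from rfl]
  | cons l rest ih =>
    intro db curB curKey
    by_cases hb : PySem.Str.strip l = ""
    · by_cases hnz : (pvParseBlock curB).size ≠ 0
      · -- A flushes; B emits the pending block
        have hcurB : curB ≠ [] := by
          intro he; subst he; exact hnz rfl
        rw [loopA_cons_flush l rest db (pvParseBlock curB) curKey hb hnz,
          pvRestB_cons_blank_emit db curB l rest hb hcurB]
        have hemit : pvEmitB db curB = pvStoreA db (pvParseBlock curB) := by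
          simp [pvEmitB, pvStoreA]
        rw [hemit, ← ih (pvStoreA db (pvParseBlock curB)) [] none]
        rfl
      · -- blank line, empty current package: both effectively skip
        push_neg at hnz
        rw [loopA_cons_blank_skip l rest db (pvParseBlock curB) curKey hb hnz]
        by_cases hc : curB ≠ []
        · rw [pvRestB_cons_blank_emit db curB l rest hb hc]
          have : pvEmitB db curB = db := by
            simp [pvEmitB, size_zero_get? _ _ hnz]
          rw [this]
          have hpb : pvParseBlock curB = pvParseBlock [] := size_zero_eq_empty _ hnz
          rw [hpb]
          exact ih db [] curKey
        · push_neg at hc; subst hc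
          rw [pvRestB_cons_blank_skip db l rest hb]
          exact ih db [] curKey
    · by_cases hcol : PySem.Str.isIn ":" (PySem.Str.strip l) = true
      · -- key:value line
        rw [loopA_cons_kv l rest db (pvParseBlock curB) curKey hb hcol,
          pvRestB_cons_nonblank db curB l rest hb]
        by_cases hd : PySem.Str.strip (((PySem.Str.splitMax? (PySem.Str.strip l) ":" 1).getD []).getD 0 "") = "Description" ∧
            PySem.Str.strip (((PySem.Str.splitMax? (PySem.Str.strip l) ":" 1).getD []).getD 1 "") = ""
        · rw [if_pos hd, ← ih db (curB ++ [PySem.Str.strip l]) curKey, parseBlock_append,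
            parseLine_kv (pvParseBlock curB) (PySem.Str.strip l) hcol, if_pos hd]
        · rw [if_neg hd,
            ← ih db (curB ++ [PySem.Str.strip l])
              (some (PySem.Str.strip (((PySem.Str.splitMax? (PySem.Str.strip l) ":" 1).getD []).getD 0 ""))),
            parseBlock_append, parseLine_kv (pvParseBlock curB) (PySem.Str.strip l) hcol, if_neg hd]
          by_cases hcont : (pvParseBlock curB).contains
              (PySem.Str.strip (((PySem.Str.splitMax? (PySem.Str.strip l) ":" 1).getD []).getD 0 "")) = true
          · rw [if_neg (not_not_intro hcont), if_pos hcont]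
          · rw [if_pos hcont, if_neg hcont]
      · -- non-blank line without a colon: both skip it
        rw [loopA_cons_nocolon_skip l rest db (pvParseBlock curB) curKey hb (by simpa using hcol),
          pvRestB_cons_nonblank db curB l rest hb,
          ← ih db (curB ++ [PySem.Str.strip l]), parseBlock_append,
          parseLine_nocolon (pvParseBlock curB) (PySem.Str.strip l) (by simpa using hcol)]

-- ===== VERDICT (by name: the statement is the Claim_ definition above) =====
theorem parse_dpkg_status_spec : Claim_equal_parse_dpkg_status := by
  intro stream _
  unfold Spec_parse_dpkg_status parse_dpkg_status parse_dpkg_status_alt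
  have h := loopA_eq_restB stream PySem.Dict.empty [] none
  simp only [pvFinishA, pvRestB, pvBlocks] at h ⊢
  rw [show pvParseBlock [] = PySem.Dict.empty from rfl] at h
  rw [h]
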